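-- pv_equiv track=rewrite | github.com/Ray7K/eeft_sched | tools/taskset_generator.py | finalize_wcet_against_period
-- ===== SOURCE A (Python) =====
-- from typing import Dict, List, Tuple
--
-- def finalize_wcet_against_period(wcet_list: List[int], period: int) -> List[int]:
--     fixed = []
--     for w in wcet_list:
--         if w >= period:
--             fixed_w = max(1, period - 1)
--         else:
--             fixed_w = w
--         fixed.append(fixed_w)
--     for i in range(1, len(fixed)):
--         if fixed[i] < fixed[i - 1]:
--             fixed[i] = fixed[i - 1]
--     return fixed
-- ===== SOURCE B (Python) =====
-- def finalize_wcet_against_period(wcet_list, period):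
--     out = []
--     m = None
--     for w in wcet_list:
--         c = max(1, period - 1) if w >= period else w
--         m = c if m is None else max(c, m)
--         out.append(m)
--     return out
-- ===== Notes on version B (the rewrite author's own statement) =====
-- stated objective: simpler
-- what changed: Fuses A's two passes (clamp list, then in-place cumulative-max fix-up over indices) into one streaming pass that maintains a running maximum accumulator.
import Mathlib
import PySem

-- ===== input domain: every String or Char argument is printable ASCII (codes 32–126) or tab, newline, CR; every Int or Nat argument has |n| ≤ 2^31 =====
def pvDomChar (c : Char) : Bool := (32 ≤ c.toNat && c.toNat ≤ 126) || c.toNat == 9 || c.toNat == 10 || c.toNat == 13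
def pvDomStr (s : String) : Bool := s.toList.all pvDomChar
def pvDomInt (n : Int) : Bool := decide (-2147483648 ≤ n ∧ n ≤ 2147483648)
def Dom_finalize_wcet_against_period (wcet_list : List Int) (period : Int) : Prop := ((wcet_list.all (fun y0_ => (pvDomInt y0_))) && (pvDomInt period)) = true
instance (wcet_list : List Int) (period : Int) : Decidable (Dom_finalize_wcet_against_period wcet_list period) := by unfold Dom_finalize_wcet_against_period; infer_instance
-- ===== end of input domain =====

-- B fuses A's clamp pass and in-place cumulative-max pass into one streaming pass with a running maximum (objective: simpler).


-- ===== PORT A =====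
-- second pass of A: for i in range(1, len(fixed)): if fixed[i] < fixed[i-1]: fixed[i] = fixed[i-1]
-- (in-place, so the comparison is against the already-updated previous element; ported as a
-- recursion carrying the previous (updated) element)
def pvFixupA (prev : Int) : List Int → List Int
  | [] => []
  | x :: xs =>
    let y := if x < prev then prev else x
    y :: pvFixupA y xs

def finalize_wcet_against_period (wcet_list : List Int) (period : Int) : List Int :=
  let fixed := wcet_list.foldl
    (fun acc w => acc ++ [if w ≥ period then max 1 (period - 1) else w]) []
  match fixed with
  | [] => []
  | x :: xs => x :: pvFixupA x xs

-- ===== PORT B =====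
def finalize_wcet_against_period_alt (wcet_list : List Int) (period : Int) : List Int :=
  (wcet_list.foldl
    (fun (st : List Int × Option Int) w =>
      let c := if w ≥ period then max 1 (period - 1) else w
      let m := match st.2 with
        | none => c
        | some p => max c p
      (st.1 ++ [m], some m))
    ([], none)).1

-- ===== PRECONDITION & SPEC =====
def Spec_finalize_wcet_against_period (wcet_list : List Int) (period : Int) (out : List Int) : Prop := out = finalize_wcet_against_period_alt wcet_list period
instance (wcet_list : List Int) (period : Int) (out : List Int) : Decidable (Spec_finalize_wcet_against_period wcet_list period out) := by unfold Spec_finalize_wcet_against_period; infer_instance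

-- ===== CLAIM (what is proved, stated in full; the proofs are below) =====
def Claim_equal_finalize_wcet_against_period : Prop := ∀ (wcet_list : List Int) (period : Int), Dom_finalize_wcet_against_period wcet_list period → Spec_finalize_wcet_against_period wcet_list period (finalize_wcet_against_period wcet_list period)

-- ===== LEMMAS AND PROOFS =====

-- A's first loop builds exactly the clamped map.
theorem pvClampFold (period : Int) (xs : List Int) (acc : List Int) :
    xs.foldl (fun acc w => acc ++ [if w ≥ period then max 1 (period - 1) else w]) acc
      = acc ++ xs.map (fun w => if w ≥ period then max 1 (period - 1) else w) := by
  induction xs generalizing acc with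
  | nil => simp
  | cons x xs ih => simp [List.foldl, ih]

-- B's fold, once the running maximum is some p, appends exactly A's fix-up of the remaining clamped values.
theorem pvAltFold (period : Int) (xs : List Int) (acc : List Int) (p : Int) :
    (xs.foldl
      (fun (st : List Int × Option Int) w =>
        let c := if w ≥ period then max 1 (period - 1) else w
        let m := match st.2 with
          | none => c
          | some q => max c q
        (st.1 ++ [m], some m))
      (acc, some p)).1
      = acc ++ pvFixupA p (xs.map (fun w => if w ≥ period then max 1 (period - 1) else w)) := by
  induction xs generalizing acc p with
  | nil => simp [pvFixupA]
  | cons x xs ih =>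
    simp only [List.foldl, List.map, pvFixupA]
    have hm : max (if x ≥ period then max 1 (period - 1) else x) p
        = (if (if x ≥ period then max 1 (period - 1) else x) < p then p
           else (if x ≥ period then max 1 (period - 1) else x)) := by
      split_ifs <;> omega
    rw [ih, hm]
    simp

-- ===== VERDICT (by name: the statement is the Claim_ definition above) =====
theorem finalize_wcet_against_period_spec : Claim_equal_finalize_wcet_against_period := by
  intro wcet_list period _
  unfold Spec_finalize_wcet_against_period finalize_wcet_against_period finalize_wcet_against_period_alt
  rw [pvClampFold]
  cases wcet_list with
  | nil => simp
  | cons x xs =>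
    simp only [List.map, List.nil_append, List.foldl]
    rw [pvAltFold]
    simp
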